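-- pv_equiv track=rewrite | github.com/liangwj18/repo_smell_decection | location_tool/repo_locate_tool_java.py | find_two_cls_use_members
-- ===== SOURCE A (Python) =====
-- def find_two_cls_use_members(member_pair):
--     #classcode, member_list  #0 is Question
--     use_member_map = [{},{}]
--     for i in range(2):
--         code = member_pair[0][0]
--         code_lines = code.splitlines()
--         member_function_list = member_pair[1][1]
--
--
--         for j in range(len(member_function_list)):
--             method_name, method_text, return_text = member_function_list[j]
--             if method_name == "member_variable":
--                 for x in method_text.split("\n"):
--                     variable = x.split(" =")[0].split("=")[0].split(";")[0].split(" ")[-1]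
--                     if code.find(variable)!=-1:
--                         use_line = find_x_in_lines(variable, code_lines)
--                         use_member_map[i][j] = use_line
--                     break
--             else:
--                 if code.find(method_name)!=-1:
--                     use_line = find_x_in_lines(method_name, code_lines)
--                     use_member_map[i][j] = use_line
--         member_pair = [member_pair[1], member_pair[0]]
--     return use_member_map
--
-- def find_x_in_lines(x,lines):
--     use_line = ""
--     for line in lines:
--         if x in line:
--             use_line = line.strip()
--     return use_line
-- ===== SOURCE B (Python) =====
-- def find_two_cls_use_members(member_pair):
--     # One pass per class code: scan the code lines once, maintaining a
--     # token -> last stripped matching line map for all of the other class's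
--     # member tokens at once, instead of rescanning every line per member.
--     p0, p1 = member_pair[0], member_pair[1]
--     return [_side(p0[0], p1[1]), _side(p1[0], p0[1])]
--
--
-- def _token(name, text):
--     if name != "member_variable":
--         return name
--     first = text.split("\n")[0]
--     return first.split(" =")[0].split("=")[0].split(";")[0].split(" ")[-1]
--
--
-- def _side(code, members):
--     toks = [_token(n, t) for (n, t, _r) in members]
--     distinct = list(dict.fromkeys(toks))
--     last = {}
--     for line in code.splitlines():
--         stripped = line.strip()
--         for tok in distinct:
--             if tok in line:
--                 last[tok] = stripped
--     return {j: last.get(tok, "") for j, tok in enumerate(toks) if tok in code}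
-- ===== Notes on version B (the rewrite author's own statement) =====
-- stated objective: alternative
-- what changed: B inverts the loop nesting: instead of A's per-member full rescans of all code lines (find_x_in_lines once per member), B scans each class's code lines ONCE, maintaining a token -> last stripped matching line dictionary for all of the other class's member tokens simultaneously, then assembles the result by lookup; A's swap-the-pair-and-repeat loop becomes two direct calls.
import Mathlib
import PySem

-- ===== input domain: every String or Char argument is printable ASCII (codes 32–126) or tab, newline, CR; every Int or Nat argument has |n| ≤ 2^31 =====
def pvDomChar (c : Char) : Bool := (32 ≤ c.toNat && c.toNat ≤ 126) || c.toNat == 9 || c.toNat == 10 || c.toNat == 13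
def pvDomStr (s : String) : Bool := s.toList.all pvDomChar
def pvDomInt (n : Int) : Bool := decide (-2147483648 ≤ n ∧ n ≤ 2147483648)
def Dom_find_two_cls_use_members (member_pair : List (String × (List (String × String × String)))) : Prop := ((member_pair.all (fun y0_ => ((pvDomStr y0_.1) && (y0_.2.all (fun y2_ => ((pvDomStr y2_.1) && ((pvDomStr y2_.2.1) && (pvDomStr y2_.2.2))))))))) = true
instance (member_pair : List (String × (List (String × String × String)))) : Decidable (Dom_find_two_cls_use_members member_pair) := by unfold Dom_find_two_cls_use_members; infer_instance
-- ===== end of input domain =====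

-- B inverts the loop nesting: one pass over each class's code lines maintaining a
-- token -> last stripped matching line map for all of the other class's member tokens
-- at once, instead of A's per-member full rescans (objective: alternative).
-- Neither implementation mutates its argument.

-- ===== PORT A =====

-- the variable-name extraction chain
-- x.split(" =")[0].split("=")[0].split(";")[0].split(" ")[-1] ([0]/[-1] on a result
-- of str.split with a non-empty separator, which is never empty, so headD/getLastD are exact)
def pvVariableOf (x : String) : String :=
  let a := ((PySem.Str.split? x " =").getD []).headD ""
  let b := ((PySem.Str.split? a "=").getD []).headD ""
  let c := ((PySem.Str.split? b ";").getD []).headD ""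
  ((PySem.Str.split? c " ").getD []).getLastD ""

def pvFindXInLines (x : String) (lines : List String) : String :=
  lines.foldl (fun use_line line => if PySem.Str.isIn x line then PySem.Str.strip line else use_line) ""

def pvScanMembers (code : String) (code_lines : List String) (member_function_list : List (String × String × String)) : PySem.Dict Int String :=
  (PySem.List.pyRange 0 (PySem.List.len member_function_list)).foldl (fun d j =>
    let m := PySem.List.pyGetD member_function_list j ("", "", "")
    if m.1 == "member_variable" then
      -- 'for x in method_text.split("\n"): …; break' runs the body on the head only
      match (PySem.Str.split? m.2.1 "\n").getD [] with
      | [] => d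
      | x :: _ =>
        let variable_ := pvVariableOf x
        if PySem.Str.find code variable_ ≠ -1 then
          d.insert j (pvFindXInLines variable_ code_lines)
        else d
    else
      if PySem.Str.find code m.1 ≠ -1 then
        d.insert j (pvFindXInLines m.1 code_lines)
      else d)
    PySem.Dict.empty

def find_two_cls_use_members (member_pair : List (String × (List (String × String × String)))) : List (List (Int × String)) :=
  -- iteration i = 0 of 'for i in range(2)'
  let code0 := (PySem.List.pyGetD member_pair 0 ("", [])).1
  let d0 := pvScanMembers code0 (PySem.Str.splitlines code0) (PySem.List.pyGetD member_pair 1 ("", [])).2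
  -- member_pair = [member_pair[1], member_pair[0]]
  let member_pair1 := [PySem.List.pyGetD member_pair 1 ("", []), PySem.List.pyGetD member_pair 0 ("", [])]
  -- iteration i = 1
  let code1 := (PySem.List.pyGetD member_pair1 0 ("", [])).1
  let d1 := pvScanMembers code1 (PySem.Str.splitlines code1) (PySem.List.pyGetD member_pair1 1 ("", [])).2
  [d0.items, d1.items]

-- ===== PORT B =====

def pvTokenOf (name text : String) : String :=
  if name != "member_variable" then name
  else pvVariableOf (((PySem.Str.split? text "\n").getD []).headD "")

-- _side(code, members): one pass over the lines updating last[tok] for every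
-- distinct token, then assemble {j: last.get(tok, "")} by lookup
def pvSide (code : String) (members : List (String × String × String)) : PySem.Dict Int String :=
  let toks := members.map (fun m => pvTokenOf m.1 m.2.1)
  let distinct := PySem.List.dedup toks
  let last := (PySem.Str.splitlines code).foldl (fun d line =>
      let stripped := PySem.Str.strip line
      distinct.foldl (fun d tok => if PySem.Str.isIn tok line then d.insert tok stripped else d) d)
    PySem.Dict.empty
  (PySem.List.enumerate toks).foldl (fun d p =>
      if PySem.Str.isIn p.2 code then d.insert p.1 (last.getD p.2 "") else d)
    PySem.Dict.empty

def find_two_cls_use_members_alt (member_pair : List (String × (List (String × String × String)))) : List (List (Int × String)) :=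
  match member_pair with
  | p0 :: p1 :: _ => [(pvSide p0.1 p1.2).items, (pvSide p1.1 p0.2).items]
  | _ => []

-- ===== PRECONDITION & SPEC =====
-- Python A raises IndexError on member_pair[1] when fewer than two classes are given
def Pre_find_two_cls_use_members (member_pair : List (String × (List (String × String × String)))) : Prop := 2 ≤ member_pair.length
instance (member_pair : List (String × (List (String × String × String)))) : Decidable (Pre_find_two_cls_use_members member_pair) := by unfold Pre_find_two_cls_use_members; infer_instance

def pvWitness_find_two_cls_use_members : (List (String × (List (String × String × String)))) :=
  [("int x;\nx = 1;", [("getY", "int getY()", "int")]), ("a.getY()", [("member_variable", "int x;", "")])]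

def Spec_find_two_cls_use_members (member_pair : List (String × (List (String × String × String)))) (out : List (List (Int × String))) : Prop := out = find_two_cls_use_members_alt member_pair
instance (member_pair : List (String × (List (String × String × String)))) (out : List (List (Int × String))) : Decidable (Spec_find_two_cls_use_members member_pair out) := by unfold Spec_find_two_cls_use_members; infer_instance

-- ===== CLAIM (what is proved, stated in full; the proofs are below) =====
def Claim_equal_find_two_cls_use_members : Prop := ∀ (member_pair : List (String × (List (String × String × String)))), Dom_find_two_cls_use_members member_pair → Pre_find_two_cls_use_members member_pair → Spec_find_two_cls_use_members member_pair (find_two_cls_use_members member_pair)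

-- ===== LEMMAS AND PROOFS =====

-- proof-level common form: per member, the last stripped line containing its token
def pvLastLineWith (tok : String) (lines : List String) : String :=
  match lines.reverse.find? (fun line => PySem.Str.isIn tok line) with
  | some line => PySem.Str.strip line
  | none => ""

def pvLocate (code : String) (members : List (String × String × String)) : PySem.Dict Int String :=
  let lines := PySem.Str.splitlines code
  (PySem.List.enumerate members).foldl (fun d p =>
    let tok := pvTokenOf p.2.1 p.2.2.1
    if PySem.Str.isIn tok code then d.insert p.1 (pvLastLineWith tok lines) else d)
    PySem.Dict.empty

-- splitOn's worker always returns at least one piece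
lemma pv_go_pos (sep : List Char) : ∀ (fuel : Nat) (l cur : List Char) (acc : List (List Char)),
    0 < (PySem.Chars.splitOn.go sep fuel l cur acc).length := by
  intro fuel
  induction fuel with
  | zero => intro l cur acc; simp [PySem.Chars.splitOn.go]
  | succ n ih =>
    intro l cur acc
    cases l with
    | nil => simp [PySem.Chars.splitOn.go]
    | cons c rest =>
      rw [PySem.Chars.splitOn.go]
      split
      · exact ih _ _ _
      · exact ih _ _ _

lemma pv_splitOn_ne_nil (cs sep : List Char) : PySem.Chars.splitOn cs sep ≠ [] := by
  have h := pv_go_pos sep (cs.length + 1) cs [] []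
  unfold PySem.Chars.splitOn
  exact List.ne_nil_of_length_pos h

-- str.split with a non-empty separator never returns an empty list
lemma pv_split_ne_nil (s sep : String) (h : sep.toList ≠ []) :
    (PySem.Str.split? s sep).getD [] ≠ [] := by
  have h2 : (sep.toList).isEmpty = false := by
    cases hl : sep.toList with
    | nil => exact absurd hl h
    | cons a l => rfl
  simp [PySem.Str.split?, PySem.Chars.split?, h2, pv_splitOn_ne_nil]

-- A's keep-the-last-match forward fold is a first-match search over the reversed list
lemma pv_foldl_last (x : String) (lines : List String) (acc : String) :
    lines.foldl (fun use_line line => if PySem.Str.isIn x line then PySem.Str.strip line else use_line) acc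
      = (match lines.reverse.find? (fun line => PySem.Str.isIn x line) with
         | some line => PySem.Str.strip line
         | none => acc) := by
  induction lines generalizing acc with
  | nil => rfl
  | cons l ls ih =>
    simp only [List.foldl_cons, List.reverse_cons, List.find?_append]
    rw [ih]
    cases hf : ls.reverse.find? (fun line => PySem.Str.isIn x line) with
    | some m => simp
    | none =>
      cases hi : PySem.Chars.isIn x.toList l.toList <;> simp [List.find?, hi]

lemma pv_fxil_eq (x : String) (lines : List String) :
    pvFindXInLines x lines = pvLastLineWith x lines := by
  unfold pvFindXInLines pvLastLineWith
  exact pv_foldl_last x lines ""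

lemma pv_nl_ne : ("\n" : String).toList ≠ [] := by decide

-- code.find(t) != -1 iff t in code, lifted to the branch both loops take
lemma pv_if_eq' (code t : String) (lines : List String) (d : PySem.Dict Int String) (j : Int) :
    (if PySem.Chars.find code.toList t.toList = -1 then d else d.insert j (pvFindXInLines t lines))
      = (if PySem.Chars.isIn t.toList code.toList = true then d.insert j (pvLastLineWith t lines) else d) := by
  by_cases h : t.toList <:+: code.toList
  · rw [if_neg (by intro hc; exact (PySem.Chars.find_eq_neg_one_iff _ _).mp hc h),
        if_pos ((PySem.Chars.isIn_iff_infix _ _).mpr h), pv_fxil_eq]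
  · rw [if_pos ((PySem.Chars.find_eq_neg_one_iff _ _).mpr h),
        if_neg (fun hc => h ((PySem.Chars.isIn_iff_infix _ _).mp hc))]

set_option maxHeartbeats 1000000 in
-- A's loop body for member m agrees with the common per-member form
lemma pv_body_eq (code : String) (lines : List String) (d : PySem.Dict Int String) (j : Int) (m : String × String × String) :
    (if m.1 == "member_variable" then
        match (PySem.Str.split? m.2.1 "\n").getD [] with
        | [] => d
        | x :: _ =>
          let variable_ := pvVariableOf x
          if PySem.Str.find code variable_ ≠ -1 then
            d.insert j (pvFindXInLines variable_ lines)
          else d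
      else
        if PySem.Str.find code m.1 ≠ -1 then
          d.insert j (pvFindXInLines m.1 lines)
        else d)
      = (let tok := pvTokenOf m.1 m.2.1
         if PySem.Str.isIn tok code then d.insert j (pvLastLineWith tok lines) else d) := by
  cases hb : (m.1 == "member_variable") with
  | false =>
    have hb' : ¬ (m.1 = "member_variable") := by simpa using hb
    simp [pvTokenOf, hb']
    convert pv_if_eq' code m.1 lines d j
  | true =>
    have hb' : m.1 = "member_variable" := by simpa using hb
    obtain ⟨x, xs, hxx⟩ := List.exists_cons_of_ne_nil (pv_split_ne_nil m.2.1 "\n" pv_nl_ne)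
    simp [pvTokenOf, hb', hxx]
    convert pv_if_eq' code (pvVariableOf x) lines d j

set_option maxHeartbeats 1000000 in
-- A's side = the common per-member form
lemma pv_scan_eq_locate (code : String) (members : List (String × String × String)) :
    pvScanMembers code (PySem.Str.splitlines code) members = pvLocate code members := by
  unfold pvScanMembers pvLocate
  rw [PySem.List.enumerate_eq_map_pyRange members ("", "", ""), List.foldl_map]
  refine PySem.List.foldl_congr_mem _ _ _ _ ?_
  intro d j hj
  exact pv_body_eq code (PySem.Str.splitlines code) d j (PySem.List.pyGetD members j ("", "", ""))

-- one line of B's inner token loop, seen through a lookup at tok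
lemma pv_inner_getD (line : String) (ts : List String) (tok : String) (d : PySem.Dict String String) :
    (ts.foldl (fun d t => if PySem.Str.isIn t line then d.insert t (PySem.Str.strip line) else d) d).getD tok ""
      = if tok ∈ ts ∧ PySem.Str.isIn tok line then PySem.Str.strip line else d.getD tok "" := by
  induction ts generalizing d with
  | nil => simp
  | cons t ts ih =>
    simp only [List.foldl_cons]
    rw [ih]
    by_cases hmem : tok ∈ ts ∧ PySem.Str.isIn tok line = true
    · simp [show PySem.Chars.isIn tok.toList line.toList = true from hmem.2, hmem.1]
    · rw [if_neg hmem]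
      by_cases ht : tok = t
      · subst ht
        cases hi : PySem.Chars.isIn tok.toList line.toList with
        | false => simp [PySem.Str.isIn, hi]
        | true => simp [PySem.Str.isIn, hi, PySem.Dict.getD_insert_self]
      · have hget : (if PySem.Str.isIn t line then d.insert t (PySem.Str.strip line) else d).getD tok ""
            = d.getD tok "" := by
          split
          · exact PySem.Dict.getD_insert_of_ne d _ _ ht
          · rfl
        rw [hget, if_neg]
        intro hc
        rcases hc with ⟨hin, hl⟩
        rcases List.mem_cons.mp hin with h | h
        · exact ht h
        · exact hmem ⟨h, hl⟩

-- B's single pass over the lines, seen through a lookup at a tracked token,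
-- yields the last stripped matching line
lemma pv_lines_getD (lines ts : List String) (tok : String) (htok : tok ∈ ts) (d : PySem.Dict String String) :
    (lines.foldl (fun d line =>
        ts.foldl (fun d t => if PySem.Str.isIn t line then d.insert t (PySem.Str.strip line) else d) d) d).getD tok ""
      = (match lines.reverse.find? (fun line => PySem.Str.isIn tok line) with
         | some line => PySem.Str.strip line
         | none => d.getD tok "") := by
  induction lines generalizing d with
  | nil => rfl
  | cons l ls ih =>
    simp only [List.foldl_cons, List.reverse_cons, List.find?_append]
    rw [ih]
    cases hf : ls.reverse.find? (fun line => PySem.Str.isIn tok line) with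
    | some m => simp
    | none =>
      rw [pv_inner_getD]
      cases hi : PySem.Chars.isIn tok.toList l.toList with
      | true => simp [List.find?, PySem.Str.isIn, hi, htok]
      | false => simp [List.find?, PySem.Str.isIn, hi]

-- B's side = the common per-member form
lemma pv_side_eq_locate (code : String) (members : List (String × String × String)) :
    pvSide code members = pvLocate code members := by
  simp only [pvSide, pvLocate]
  rw [PySem.List.enumerate_eq_map_pyRange (members.map (fun m => pvTokenOf m.1 m.2.1)) "",
      PySem.List.enumerate_eq_map_pyRange members ("", "", ""), List.foldl_map, List.foldl_map]
  have hlen : PySem.List.len (members.map (fun m => pvTokenOf m.1 m.2.1)) = PySem.List.len members := by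
    simp [PySem.List.len]
  rw [hlen]
  refine PySem.List.foldl_congr_mem _ _ _ _ ?_
  intro d j hj
  have hget : PySem.List.pyGetD (members.map (fun m => pvTokenOf m.1 m.2.1)) j ""
      = pvTokenOf (PySem.List.pyGetD members j ("", "", "")).1 (PySem.List.pyGetD members j ("", "", "")).2.1 := by
    have := PySem.List.pyGetD_map (fun m : String × String × String => pvTokenOf m.1 m.2.1) members j ("", "", "")
    simpa [pvTokenOf] using this
  have hj' := (PySem.List.mem_pyRange_one).mp hj
  have hmem : PySem.List.pyGetD (members.map (fun m => pvTokenOf m.1 m.2.1)) j ""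
      ∈ (members.map (fun m => pvTokenOf m.1 m.2.1)) := by
    obtain ⟨n, rfl⟩ := Int.eq_ofNat_of_zero_le hj'.1
    have hn : n < members.length := by
      have := hj'.2
      simp [PySem.List.len] at this
      exact_mod_cast this
    rw [PySem.List.pyGetD_natCast]
    have : (members.map (fun m => pvTokenOf m.1 m.2.1)).getD n ""
        = (members.map (fun m => pvTokenOf m.1 m.2.1))[n]'(by simpa using hn) := by
      rw [List.getD_eq_getElem?_getD, List.getElem?_eq_getElem (by simpa using hn)]
      rfl
    rw [this]
    exact List.getElem_mem _
  have hdm : PySem.List.pyGetD (members.map (fun m => pvTokenOf m.1 m.2.1)) j ""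
      ∈ PySem.List.dedup (members.map (fun m => pvTokenOf m.1 m.2.1)) :=
    (PySem.List.mem_dedup _ _).mpr hmem
  simp only [hget] at hdm hmem ⊢
  have hlast := pv_lines_getD (PySem.Str.splitlines code)
    (PySem.List.dedup (members.map (fun m => pvTokenOf m.1 m.2.1)))
    _ hdm PySem.Dict.empty
  rw [hlast]
  unfold pvLastLineWith
  cases hf : (PySem.Str.splitlines code).reverse.find?
      (fun line => PySem.Str.isIn (pvTokenOf (PySem.List.pyGetD members j ("", "", "")).1 (PySem.List.pyGetD members j ("", "", "")).2.1) line) with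
  | some m => rfl
  | none => simp

-- ===== VERDICT (by name: the statement is the Claim_ definition above) =====
theorem find_two_cls_use_members_spec : Claim_equal_find_two_cls_use_members := by
  intro mp _hdom hpre
  unfold Spec_find_two_cls_use_members
  have hlen : 2 ≤ mp.length := hpre
  rcases mp with _ | ⟨p0, _ | ⟨p1, rest⟩⟩
  · simp at hlen
  · simp at hlen
  · simp only [find_two_cls_use_members, find_two_cls_use_members_alt,
      PySem.List.pyGetD_ofNat', List.getD_cons_zero, List.getD_cons_succ]
    rw [pv_scan_eq_locate, pv_scan_eq_locate, pv_side_eq_locate, pv_side_eq_locate]
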